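-- pv_equiv track=rewrite | github.com/mcourte/OC_Projet4 | controllers/import json.py | create_tournament_dict
-- ===== SOURCE A (Python) =====
-- def create_tournament_dict(data):
--     result = []
--     current_tournament = None
--
--     for item in data:
--         if "Nom_du_tournoi" in item:
--             # If a new tournament is found, append the previous one to the result list
--             if current_tournament is not None:
--                 result.append(current_tournament)
--             # Start a new dictionary for the current tournament
--             current_tournament = {"Nom_du_tournoi": item["Nom_du_tournoi"]}
--         elif current_tournament is not None:
--             # If a tournament is in progress, add the current item to it
--             current_tournament.update(item)
--
--     # Append the last tournament after the loop
--     if current_tournament is not None: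
--         result.append(current_tournament)
--
--     return result
-- ===== SOURCE B (Python) =====
-- def create_tournament_dict(data):
--     items = list(data)
--     starts = [k for k, item in enumerate(items) if "Nom_du_tournoi" in item]
--     ends = starts[1:] + [len(items)]
--     result = []
--     for s, e in zip(starts, ends):
--         tournament = {"Nom_du_tournoi": items[s]["Nom_du_tournoi"]}
--         for item in items[s + 1 : e]:
--             tournament.update(item)
--         result.append(tournament)
--     return result
-- ===== Notes on version B (the rewrite author's own statement) =====
-- stated objective: alternative
-- what changed: B first computes the list of marker indices (where "Nom_du_tournoi" occurs), then builds each tournament dict from the slice between consecutive markers, instead of A's single pass with a mutable current-tournament accumulator.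
import Mathlib
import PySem

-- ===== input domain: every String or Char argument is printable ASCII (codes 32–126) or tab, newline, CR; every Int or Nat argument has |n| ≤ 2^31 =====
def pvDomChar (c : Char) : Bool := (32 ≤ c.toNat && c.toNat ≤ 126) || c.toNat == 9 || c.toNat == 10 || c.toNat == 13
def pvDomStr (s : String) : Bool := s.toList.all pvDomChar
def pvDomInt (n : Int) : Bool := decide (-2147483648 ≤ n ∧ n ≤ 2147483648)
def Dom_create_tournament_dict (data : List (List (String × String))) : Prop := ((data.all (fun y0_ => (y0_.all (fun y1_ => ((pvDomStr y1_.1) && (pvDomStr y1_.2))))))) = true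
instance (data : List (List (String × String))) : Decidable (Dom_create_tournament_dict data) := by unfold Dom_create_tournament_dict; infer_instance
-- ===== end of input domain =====

-- B groups items by the list of marker indices (starts/ends pairs + slices) instead of A's
-- single pass with a mutable current-tournament accumulator; objective: alternative, same cost.

-- shared helpers (each item is a Python dict, ported as its pair list read through Dict.ofList)
def tdKey : String := "Nom_du_tournoi"

def tdHasKey (item : List (String × String)) : Bool :=
  (PySem.Dict.ofList item).contains tdKey

def tdSeed (item : List (String × String)) : PySem.Dict String String :=
  PySem.Dict.insert PySem.Dict.empty tdKey ((PySem.Dict.ofList item).getD tdKey "")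

-- ===== PORT A =====
def tdStepA (st : List (PySem.Dict String String) × Option (PySem.Dict String String))
    (item : List (String × String)) :
    List (PySem.Dict String String) × Option (PySem.Dict String String) :=
  if tdHasKey item then
    ((match st.2 with | some c => st.1 ++ [c] | none => st.1), some (tdSeed item))
  else
    match st.2 with
    | some c => (st.1, some (PySem.Dict.update c item))
    | none => st

def create_tournament_dict (data : List (List (String × String))) : List (List (String × String)) :=
  let fin := data.foldl tdStepA ([], none)
  (match fin.2 with | some c => fin.1 ++ [c] | none => fin.1).map PySem.Dict.items

-- ===== PORT B =====
def create_tournament_dict_alt (data : List (List (String × String))) : List (List (String × String)) :=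
  let items := data
  let starts : List Int := ((PySem.List.enumerate items 0).filter (fun p => tdHasKey p.2)).map (·.1)
  let ends : List Int := starts.tail ++ [(items.length : Int)]
  (starts.zip ends).map (fun se =>
    let tournament := tdSeed ((PySem.List.pyGet? items se.1).getD [])
    ((PySem.List.slice items (some (se.1 + 1)) (some se.2)).foldl
        (fun d item => PySem.Dict.update d item) tournament).items)

-- ===== PRECONDITION & SPEC =====
def Spec_create_tournament_dict (data : List (List (String × String))) (out : List (List (String × String))) : Prop := out = create_tournament_dict_alt data
instance (data : List (List (String × String))) (out : List (List (String × String))) : Decidable (Spec_create_tournament_dict data out) := by unfold Spec_create_tournament_dict; infer_instance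

-- ===== CLAIM (what is proved, stated in full; the proofs are below) =====
def Claim_equal_create_tournament_dict : Prop := ∀ (data : List (List (String × String))), Dom_create_tournament_dict data → Spec_create_tournament_dict data (create_tournament_dict data)

-- ===== LEMMAS AND PROOFS =====

-- common recursive specification: one group per marker, updated with the run of
-- non-marker items that follows it
def tdG : List (List (String × String)) → List (PySem.Dict String String)
  | [] => []
  | x :: xs =>
    if tdHasKey x then
      ((xs.takeWhile (fun it => !tdHasKey it)).foldl (fun d it => PySem.Dict.update d it) (tdSeed x)) :: tdG xs
    else tdG xs

-- Nat-valued marker positions, structurally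
def tdNst : List (List (String × String)) → List Nat
  | [] => []
  | x :: xs => if tdHasKey x then 0 :: (tdNst xs).map (· + 1) else (tdNst xs).map (· + 1)

lemma tdLoopA (xs : List (List (String × String)))
    (res : List (PySem.Dict String String)) (cur : Option (PySem.Dict String String)) :
    (match (xs.foldl tdStepA (res, cur)).2 with
      | some c => (xs.foldl tdStepA (res, cur)).1 ++ [c]
      | none => (xs.foldl tdStepA (res, cur)).1) =
    res ++ (match cur with
      | none => tdG xs
      | some d => ((xs.takeWhile (fun it => !tdHasKey it)).foldl (fun d it => PySem.Dict.update d it) d) :: tdG xs) := by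
  induction xs generalizing res cur with
  | nil => cases cur <;> simp [tdG]
  | cons x xs ih =>
    by_cases hx : tdHasKey x = true
    · cases cur <;> simp [tdStepA, hx, ih, tdG]
    · cases cur <;> simp [tdStepA, hx, ih, tdG]

lemma tdA_eq_G (data : List (List (String × String))) :
    create_tournament_dict data = (tdG data).map PySem.Dict.items := by
  show (match (data.foldl tdStepA ([], none)).2 with
    | some c => (data.foldl tdStepA ([], none)).1 ++ [c]
    | none => (data.foldl tdStepA ([], none)).1).map PySem.Dict.items = _
  rw [tdLoopA]
  simp

-- entry index shift: enumerate-derived marker indices are tdNst, offset by the start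
lemma tdEnumStarts (items : List (List (String × String))) (s : Int) :
    ((PySem.List.enumerate items s).filter (fun p => tdHasKey p.2)).map (·.1) =
      (tdNst items).map (fun (k : Nat) => s + (k : Int)) := by
  induction items generalizing s with
  | nil => simp [PySem.List.enumerate_nil, tdNst]
  | cons x xs ih =>
    have key : ((tdNst xs).map (· + 1)).map (fun (k : Nat) => s + (k : Int)) =
        (tdNst xs).map (fun (k : Nat) => (s + 1) + (k : Int)) := by
      rw [List.map_map]
      refine List.map_congr_left ?_
      intro k _
      simp only [Function.comp]
      push_cast
      ring
    rw [PySem.List.enumerate_cons, tdNst]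
    by_cases hx : tdHasKey x = true
    · rw [List.filter_cons_of_pos (by simpa using hx), List.map_cons, ih (s + 1), if_pos hx,
        List.map_cons, ← key]
      simp
    · rw [List.filter_cons_of_neg (by simpa using hx), ih (s + 1), if_neg hx, ← key]

-- one segment, Nat-indexed
def tdSegN (items : List (List (String × String))) (s e : Nat) : List (String × String) :=
  (((items.drop (s + 1)).take (e - (s + 1))).foldl (fun d it => PySem.Dict.update d it)
    (tdSeed (items.getD s []))).items

lemma tdSegN_shift (x : List (String × String)) (xs : List (List (String × String))) (s e : Nat) :
    tdSegN (x :: xs) (s + 1) (e + 1) = tdSegN xs s e := by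
  have h : e + 1 - (s + 1 + 1) = e - (s + 1) := by omega
  simp [tdSegN, h, List.getD]

lemma tdCastZip (m : List Nat) (n : Nat) (F : Int × Int → List (String × String))
    (Gf : Nat × Nat → List (String × String)) (h : ∀ s e : Nat, F ((s : Int), (e : Int)) = Gf (s, e)) :
    ((m.map (fun (k : Nat) => (k : Int))).zip ((m.map (fun (k : Nat) => (k : Int))).tail ++ [(n : Int)])).map F =
      (m.zip (m.tail ++ [n])).map Gf := by
  rw [← List.map_tail, show ([(n : Int)] : List Int) = ([n] : List Nat).map (fun (k : Nat) => (k : Int)) from by simp,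
    ← List.map_append, List.zip_map, List.map_map]
  refine List.map_congr_left ?_
  rintro ⟨a, b⟩ _
  simpa using h a b

lemma tdAlt_eq_natBody (data : List (List (String × String))) :
    create_tournament_dict_alt data =
      ((tdNst data).zip ((tdNst data).tail ++ [data.length])).map
        (fun se => tdSegN data se.1 se.2) := by
  show (((((PySem.List.enumerate data 0).filter (fun p => tdHasKey p.2)).map (·.1))).zip
      (((((PySem.List.enumerate data 0).filter (fun p => tdHasKey p.2)).map (·.1))).tail ++
        [(data.length : Int)])).map _ = _
  rw [tdEnumStarts data 0,
    show (fun k : Nat => (0 : Int) + (k : Int)) = (fun k : Nat => (k : Int)) from by funext k; ring]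
  refine tdCastZip _ _ _ _ ?_
  intro a b
  have h1 : ((a : Int) + 1) = (((a + 1 : Nat)) : Int) := by push_cast; ring
  simp only [h1, PySem.List.slice_natCast, PySem.List.pyGet?_natCast]
  simp [tdSegN, List.getD_eq_getElem?_getD]

lemma tdNst_nil_no_marker (xs : List (List (String × String))) (h : tdNst xs = []) :
    ∀ it ∈ xs, tdHasKey it = false := by
  induction xs with
  | nil => simp
  | cons x xs ih =>
    rw [tdNst] at h
    by_cases hx : tdHasKey x = true
    · simp [hx] at h
    · rw [if_neg hx, List.map_eq_nil_iff] at h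
      intro it hit
      rcases List.mem_cons.mp hit with rfl | hmem
      · simpa using hx
      · exact ih h it hmem

lemma tdG_nil_of_no_marker (xs : List (List (String × String))) (h : tdNst xs = []) :
    tdG xs = [] := by
  induction xs with
  | nil => rfl
  | cons x xs ih =>
    have hx : tdHasKey x = false := tdNst_nil_no_marker _ h x (by simp)
    rw [tdNst, hx] at h
    simp only [Bool.false_eq_true, if_false, List.map_eq_nil_iff] at h
    rw [tdG]
    simp [hx, ih h]

lemma tdNst_head_take (xs : List (List (String × String))) (m0 : Nat) (m' : List Nat)
    (h : tdNst xs = m0 :: m') : xs.take m0 = xs.takeWhile (fun it => !tdHasKey it) := by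
  induction xs generalizing m0 m' with
  | nil => simp [tdNst] at h
  | cons x xs ih =>
    rw [tdNst] at h
    by_cases hx : tdHasKey x = true
    · rw [if_pos hx] at h
      simp only [List.cons.injEq] at h
      simp [← h.1, hx]
    · rw [if_neg hx] at h
      cases hnx : tdNst xs with
      | nil => rw [hnx] at h; simp at h
      | cons k0 k' =>
        rw [hnx, List.map_cons] at h
        simp only [List.cons.injEq] at h
        rw [← h.1, List.take_succ_cons, List.takeWhile_cons_of_pos (by simp [hx])]
        rw [ih k0 k' hnx]

lemma tdNatBody_eq_G (items : List (List (String × String))) :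
    ((tdNst items).zip ((tdNst items).tail ++ [items.length])).map
        (fun se => tdSegN items se.1 se.2) = (tdG items).map PySem.Dict.items := by
  induction items with
  | nil => simp [tdNst, tdG]
  | cons x xs ih =>
    have hshift :
        (((tdNst xs).map (· + 1)).zip (((tdNst xs).map (· + 1)).tail ++ [xs.length + 1])).map
            (fun se => tdSegN (x :: xs) se.1 se.2) =
          ((tdNst xs).zip ((tdNst xs).tail ++ [xs.length])).map (fun se => tdSegN xs se.1 se.2) := by
      rw [← List.map_tail,
        show ([xs.length + 1] : List Nat) = ([xs.length] : List Nat).map (· + 1) from by simp,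
        ← List.map_append, List.zip_map, List.map_map]
      refine List.map_congr_left ?_
      rintro ⟨s, e⟩ _
      simpa [Prod.map] using tdSegN_shift x xs s e
    rw [tdNst, tdG]
    by_cases hx : tdHasKey x = true
    · rw [if_pos hx, if_pos hx]
      cases hnx : tdNst xs with
      | nil =>
        have hG : tdG xs = [] := tdG_nil_of_no_marker xs hnx
        have htw : xs.takeWhile (fun it => !tdHasKey it) = xs :=
          List.takeWhile_eq_self_iff.mpr (by
            intro it hit
            simp [tdNst_nil_no_marker xs hnx it hit])
        simp [hG, htw, tdSegN, List.getD]
      | cons m0 m' =>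
        have htw : xs.take m0 = xs.takeWhile (fun it => !tdHasKey it) :=
          tdNst_head_take xs m0 m' hnx
        rw [hnx] at hshift ih
        simp only [List.length_cons, List.map_cons, List.tail_cons, List.cons_append,
          List.zip_cons_cons, List.map_cons] at hshift ih ⊢
        rw [hshift, ih]
        refine congrArg₂ _ ?_ rfl
        simp [tdSegN, List.getD, htw]
    · rw [if_neg hx, if_neg hx]
      simp only [List.length_cons]
      rw [hshift, ih]

lemma tdB_eq_G (data : List (List (String × String))) :
    create_tournament_dict_alt data = (tdG data).map PySem.Dict.items := by
  rw [tdAlt_eq_natBody, tdNatBody_eq_G]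

-- ===== VERDICT (by name: the statement is the Claim_ definition above) =====
theorem create_tournament_dict_spec : Claim_equal_create_tournament_dict := by
  intro data _
  unfold Spec_create_tournament_dict
  rw [tdA_eq_G, tdB_eq_G]
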